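-- pv_equiv track=rewrite | github.com/JonnyS1226/My_Note | pgp_lab/service/receive.py | int_list2str
-- ===== SOURCE A (Python) =====
-- def int_list2str(input_int_list):
--     string = ''
--     local_int_list = list(input_int_list)
--     for li in local_int_list:
--         tmp = ''
--         while li > 0:
--             char = li & 0xffff
--             tmp = chr(char) + tmp
--             li = li >> 16
--         string += tmp
--     return string
-- ===== SOURCE B (Python) =====
-- def int_list2str(input_int_list):
--     pieces = []
--     for li in input_int_list:
--         if li <= 0:
--             continue
--         nchunks = (li.bit_length() + 15) // 16
--         pieces.append(''.join(chr((li >> (16 * k)) & 0xffff)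
--                               for k in range(nchunks - 1, -1, -1)))
--     return ''.join(pieces)
-- ===== Notes on version B (the rewrite author's own statement) =====
-- stated objective: idiomatic
-- what changed: A peels 16-bit chunks with a shift-and-mask while-loop, building each piece back-to-front by repeated string prepending; B computes the chunk count once from bit_length and builds each piece front-to-back by directly indexing the chunks in a comprehension, joining all pieces at the end.
import Mathlib
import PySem

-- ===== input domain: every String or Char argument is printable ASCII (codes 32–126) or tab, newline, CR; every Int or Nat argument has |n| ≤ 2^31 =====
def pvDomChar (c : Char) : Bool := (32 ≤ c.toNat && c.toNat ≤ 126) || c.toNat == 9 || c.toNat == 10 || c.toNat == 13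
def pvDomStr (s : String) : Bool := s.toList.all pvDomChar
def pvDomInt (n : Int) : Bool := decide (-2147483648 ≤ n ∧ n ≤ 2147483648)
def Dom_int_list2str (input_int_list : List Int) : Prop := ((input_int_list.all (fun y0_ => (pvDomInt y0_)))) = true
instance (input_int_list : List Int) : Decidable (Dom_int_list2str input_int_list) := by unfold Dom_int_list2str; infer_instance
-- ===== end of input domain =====

-- B replaces A's shift-and-mask while-loop (which builds each piece back-to-front by prepending)
-- with a closed-form front-to-back construction: bit_length gives the chunk count, each chunk is
-- indexed directly, and the pieces are joined once (objective: idiomatic; not claimed faster).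

-- ===== PORT A =====
-- A's 'while li > 0' loop; 'tmp = chr(char) + tmp' is the prepend, strings kept as List Char.
def pvChunkLoop (li : Int) (tmp : List Char) : List Char :=
  if h : 0 < li then
    pvChunkLoop (li >>> (16 : Nat)) (Char.ofNat (PySem.Int.band li 65535).toNat :: tmp)
  else tmp
termination_by li.toNat
decreasing_by
  rcases li with m | m
  · have hm : 0 < m := Int.natCast_pos.mp h
    show m >>> 16 < m
    rw [Nat.shiftRight_eq_div_pow]
    omega
  · exact absurd h (by omega)

-- 'local_int_list = list(input_int_list)' is a copy of the argument; iterating it = iterating the argument.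
def int_list2str (input_int_list : List Int) : String :=
  String.mk (input_int_list.foldl (fun string li => string ++ pvChunkLoop li []) [])

-- ===== PORT B =====
-- one piece: chunk count from bit_length, chunks indexed high-to-low via range(nchunks-1, -1, -1)
def pvAltPiece (li : Int) : List Char :=
  let nchunks : Nat := (PySem.Int.bitLength li + 15) / 16
  (PySem.List.pyRange ((nchunks : Int) - 1) (-1) (-1)).map
    (fun k => Char.ofNat (PySem.Int.band (li >>> ((16 * k.toNat : Nat))) 65535).toNat)

-- ''.join(pieces) is the concatenation of the piece character lists
def int_list2str_alt (input_int_list : List Int) : String :=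
  String.mk ((input_int_list.foldl
    (fun pieces li => if li ≤ 0 then pieces else pieces ++ [pvAltPiece li]) []).flatten)

-- ===== PRECONDITION & SPEC =====
-- Pre_ excludes ints whose low 16-bit chunk lies in the UTF-16 surrogate range 0xD800–0xDFFF:
-- there Python A returns a str containing an unpaired surrogate code point, which is not a value
-- of the Lean String type (no Char exists for it), so neither port can represent that output.
def Pre_int_list2str (input_int_list : List Int) : Prop :=
  ∀ li ∈ input_int_list, 0 < li →
    ¬ (55296 ≤ PySem.Int.mod li 65536 ∧ PySem.Int.mod li 65536 ≤ 57343)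
instance (input_int_list : List Int) : Decidable (Pre_int_list2str input_int_list) := by
  unfold Pre_int_list2str; infer_instance
def pvWitness_int_list2str : List Int := [70000, 1, -3, 0, 65535]

def Spec_int_list2str (input_int_list : List Int) (out : String) : Prop := out = int_list2str_alt input_int_list
instance (input_int_list : List Int) (out : String) : Decidable (Spec_int_list2str input_int_list out) := by unfold Spec_int_list2str; infer_instance

-- ===== CLAIM (what is proved, stated in full; the proofs are below) =====
def Claim_equal_int_list2str : Prop := ∀ (input_int_list : List Int), Dom_int_list2str input_int_list → Pre_int_list2str input_int_list → Spec_int_list2str input_int_list (int_list2str input_int_list)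

-- ===== LEMMAS AND PROOFS =====

theorem pvChunkLoop_nonpos (li : Int) (tmp : List Char) (h : li ≤ 0) :
    pvChunkLoop li tmp = tmp := by
  unfold pvChunkLoop
  rw [dif_neg (by omega)]

theorem pvShiftK (n k : Nat) : ((n : Int) >>> (k : Nat)) = ((n >>> k : Nat) : Int) := by
  simp [HShiftRight.hShiftRight, Int.shiftRight]

theorem pvShift16 (n : Nat) : ((n : Int) >>> (16 : Nat)) = ((n / 65536 : Nat) : Int) := by
  rw [pvShiftK, Nat.shiftRight_eq_div_pow n 16]

theorem pvBand16 (n : Nat) : PySem.Int.band (n : Int) 65535 = ((n % 65536 : Nat) : Int) := by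
  have h := PySem.Int.band_of_nonneg (a := (n : Int)) (b := 65535) (by positivity) (by norm_num)
  have h2 := Nat.and_two_pow_sub_one_eq_mod n 16
  have h3 : ((65535 : Int)).toNat = 65535 := rfl
  have h4 : ((n : Int)).toNat = n := Int.toNat_natCast n
  rw [h, h3, h4]
  norm_num at h2
  rw [h2]

-- per-element equality: for 0 < li ≤ 2^31 the while-loop piece equals the indexed piece
theorem pvPiece_eq (li : Int) (h1 : 0 < li) (h2 : li ≤ 2147483648) :
    pvChunkLoop li [] = pvAltPiece li := by
  obtain ⟨n, rfl⟩ : ∃ n : Nat, li = (n : Int) := ⟨li.toNat, by omega⟩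
  have hn1 : 1 ≤ n := by exact_mod_cast h1
  have hn2 : n ≤ 2147483648 := by exact_mod_cast h2
  have hlt : n < 2 ^ PySem.Int.bitLength (n : Int) := by
    have := PySem.Int.lt_two_pow_bitLength (n := (n : Int)); simpa using this
  have hle : 2 ^ (PySem.Int.bitLength (n : Int) - 1) ≤ n := by
    have := PySem.Int.two_pow_bitLength_le (n := (n : Int)) (by exact_mod_cast (by omega : (n:Int) ≠ 0))
    simpa using this
  set bl := PySem.Int.bitLength (n : Int) with hbl
  have hbl1 : 1 ≤ bl := by
    by_contra hc
    have hz : bl = 0 := by omega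
    rw [hz] at hlt
    omega
  by_cases hsmall : n < 65536
  · -- one chunk
    have hbl16 : bl ≤ 16 := by
      by_contra hc
      have : (2:Nat) ^ 16 ≤ 2 ^ (bl - 1) := Nat.pow_le_pow_right (by norm_num) (by omega)
      omega
    have hch : (bl + 15) / 16 = 1 := by omega
    have hA : pvChunkLoop (n : Int) [] = [Char.ofNat n] := by
      rw [pvChunkLoop, dif_pos h1, pvShift16, pvBand16]
      have : n / 65536 = 0 := by omega
      rw [this]
      rw [pvChunkLoop_nonpos _ _ (by norm_num), Int.toNat_natCast]
      rw [show n % 65536 = n from by omega]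
    rw [hA]
    simp only [pvAltPiece]
    rw [← hbl, hch]
    have h1c : ((1 : Nat) : Int) - 1 = 0 := by norm_num
    rw [h1c]
    have hr : PySem.List.pyRange 0 (-1) (-1) = [0] := by decide
    rw [hr]
    simp only [List.map]
    have e0 : (16 * (0 : Int).toNat) = 0 := rfl
    rw [e0, pvShiftK n 0, Nat.shiftRight_zero, pvBand16, Int.toNat_natCast]
    rw [show n % 65536 = n from by omega]
  · -- two chunks
    have hbl17 : 17 ≤ bl := by
      by_contra hc
      have : (2:Nat) ^ bl ≤ 2 ^ 16 := Nat.pow_le_pow_right (by norm_num) (by omega)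
      omega
    have hbl32 : bl ≤ 32 := by
      by_contra hc
      have : (2:Nat) ^ 32 ≤ 2 ^ (bl - 1) := Nat.pow_le_pow_right (by norm_num) (by omega)
      omega
    have hch : (bl + 15) / 16 = 2 := by omega
    set m := n / 65536 with hm
    have hm1 : 1 ≤ m := by omega
    have hm2 : m ≤ 32768 := by omega
    have hA : pvChunkLoop (n : Int) [] = [Char.ofNat m, Char.ofNat (n % 65536)] := by
      rw [pvChunkLoop, dif_pos h1, pvShift16, pvBand16, ← hm]
      rw [pvChunkLoop, dif_pos (by exact_mod_cast hm1), pvShift16, pvBand16]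
      have hz : m / 65536 = 0 := by omega
      rw [hz, pvChunkLoop_nonpos _ _ (by norm_num), Int.toNat_natCast, Int.toNat_natCast]
      rw [show m % 65536 = m from by omega]
    rw [hA]
    simp only [pvAltPiece]
    rw [← hbl, hch]
    have h2c : ((2 : Nat) : Int) - 1 = 1 := by norm_num
    rw [h2c]
    have hr : PySem.List.pyRange 1 (-1) (-1) = [1, 0] := by decide
    rw [hr]
    simp only [List.map]
    have e16 : (16 * (1 : Int).toNat) = 16 := rfl
    have e0 : (16 * (0 : Int).toNat) = 0 := rfl
    rw [e16, e0, pvShift16, ← hm, pvBand16, pvShiftK n 0, Nat.shiftRight_zero,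
      pvBand16, Int.toNat_natCast, Int.toNat_natCast]
    rw [show m % 65536 = m from by omega]

-- the two whole-list loops agree given the domain bound on every element
theorem pvLists_eq (xs : List Int) (hd : ∀ li ∈ xs, li ≤ 2147483648) :
    xs.foldl (fun string li => string ++ pvChunkLoop li []) [] =
    (xs.foldl (fun pieces li => if li ≤ 0 then pieces else pieces ++ [pvAltPiece li]) []).flatten := by
  rw [PySem.List.foldl_append_eq_flatMap (g := fun li => pvChunkLoop li [])]
  rw [PySem.List.foldl_congr_mem' xs
    (fun pieces li => if li ≤ 0 then pieces else pieces ++ [pvAltPiece li])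
    (fun pieces li => if 0 < li then pieces ++ [pvAltPiece li] else pieces) []
    (by
      intro li _ acc
      dsimp only
      by_cases h : 0 < li
      · rw [if_neg (by omega), if_pos h]
      · rw [if_pos (by omega), if_neg h])]
  rw [PySem.List.foldl_append_ite (p := fun li => 0 < li) (f := pvAltPiece)]
  rw [List.nil_append, List.nil_append]
  induction xs with
  | nil => simp
  | cons li t ih =>
    have hdt : ∀ x ∈ t, x ≤ 2147483648 := fun x hx => hd x (List.mem_cons_of_mem _ hx)
    by_cases h : 0 < li
    · rw [List.flatMap_cons, List.filter_cons, if_pos (by simpa using h), List.map_cons,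
        List.flatten_cons, pvPiece_eq li h (hd li List.mem_cons_self), ih hdt]
    · rw [List.flatMap_cons, List.filter_cons, if_neg (by simpa using h),
        pvChunkLoop_nonpos _ _ (by omega), ih hdt, List.nil_append]

-- ===== VERDICT (by name: the statement is the Claim_ definition above) =====
theorem int_list2str_spec : Claim_equal_int_list2str := by
  intro xs hdom _hpre
  unfold Spec_int_list2str int_list2str int_list2str_alt
  have hd : ∀ li ∈ xs, li ≤ 2147483648 := by
    simp only [Dom_int_list2str, List.all_eq_true, pvDomInt, decide_eq_true_eq] at hdom
    exact fun li h => (hdom li h).2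
  rw [pvLists_eq xs hd]
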